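-- pv_equiv track=rewrite | github.com/sandeepmanocha/myCheckIO | bit_opr.py | bitLenCount
-- ===== SOURCE A (Python) =====
-- def bitLenCount(num):
--
--     length = 0
--     count = 0
--     while (num):
--         count += (num & 1)
--         length += 1
--         num >>= 1
--     return(length, count)
-- ===== SOURCE B (Python) =====
-- def bitLenCount(num):
--     return (num.bit_length(), bin(num).count('1'))
-- ===== Notes on version B (the rewrite author's own statement) =====
-- stated objective: idiomatic
-- what changed: Replaces the one-bit-at-a-time shift-and-mask while loop with the builtins num.bit_length() and bin(num).count('1'), returning the pair directly.
import Mathlib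
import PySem

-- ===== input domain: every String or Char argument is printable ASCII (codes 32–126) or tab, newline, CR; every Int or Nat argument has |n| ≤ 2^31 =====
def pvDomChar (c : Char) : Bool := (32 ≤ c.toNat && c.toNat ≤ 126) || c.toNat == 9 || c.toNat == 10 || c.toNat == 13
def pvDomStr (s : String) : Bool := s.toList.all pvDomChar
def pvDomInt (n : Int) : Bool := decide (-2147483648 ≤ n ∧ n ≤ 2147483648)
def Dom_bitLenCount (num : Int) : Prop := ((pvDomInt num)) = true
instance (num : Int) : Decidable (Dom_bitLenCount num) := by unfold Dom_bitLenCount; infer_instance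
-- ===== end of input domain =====

-- B replaces A's shift-and-mask while loop with direct builtins (bit_length / popcount);
-- A never terminates on negative num, so Pre_ restricts to 0 ≤ num.


-- ===== PORT A =====
-- A's while loop; Pre_ guarantees num ≥ 0, on which Python ints are exactly Nat
-- (num & 1 = n % 2, num >>= 1 = n / 2), so the loop state is carried as a Nat.
def bitLenCountLoop (n : Nat) (length count : Int) : Int × Int :=
  if _h : n = 0 then (length, count)
  else bitLenCountLoop (n / 2) (length + 1) (count + (n % 2 : Nat))
termination_by n
decreasing_by exact Nat.div_lt_self (Nat.pos_of_ne_zero _h) (by norm_num)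

def bitLenCount (num : Int) : Int × Int := bitLenCountLoop num.toNat 0 0

-- ===== PORT B =====
-- num.bit_length() = Nat.size of |num| (Python bit_length ignores sign);
-- bin(num).count('1') counts the set bits of |num| (the sign is rendered as '-', not in bits).
def bitLenCount_alt (num : Int) : Int × Int :=
  ((Nat.size num.natAbs : Int), (num.natAbs.bits.count true : Int))

-- ===== PRECONDITION & SPEC =====
-- A's while loop never terminates for negative num (arithmetic >> converges to -1, not 0),
-- so Pre_ admits exactly the inputs on which the Python A returns: 0 ≤ num.
def Pre_bitLenCount (num : Int) : Prop := 0 ≤ num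
instance (num : Int) : Decidable (Pre_bitLenCount num) := by unfold Pre_bitLenCount; infer_instance
def pvWitness_bitLenCount : Int := (6)

def Spec_bitLenCount (num : Int) (out : Int × Int) : Prop := out = bitLenCount_alt num
instance (num : Int) (out : Int × Int) : Decidable (Spec_bitLenCount num out) := by unfold Spec_bitLenCount; infer_instance

-- ===== CLAIM (what is proved, stated in full; the proofs are below) =====
def Claim_equal_bitLenCount : Prop := ∀ (num : Int), Dom_bitLenCount num → Pre_bitLenCount num → Spec_bitLenCount num (bitLenCount num)

-- ===== LEMMAS AND PROOFS =====
theorem size_div_two (n : Nat) (h : n ≠ 0) : Nat.size n = Nat.size (n / 2) + 1 := by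
  conv_lhs => rw [← Nat.bit_bodd_div2 n]
  rw [Nat.size_bit (by rwa [Nat.bit_bodd_div2]), Nat.div2_val]

theorem bits_count_div_two (n : Nat) (h : n ≠ 0) :
    n.bits.count true = (n / 2).bits.count true + n % 2 := by
  conv_lhs => rw [← Nat.bit_bodd_div2 n]
  rw [Nat.bits_append_bit _ _ (fun h' => by
    rw [Nat.div2_val] at h'
    have hn : n = 1 := by omega
    subst hn; decide)]
  rw [List.count_cons, Nat.div2_val, Nat.mod_two_of_bodd]
  rcases Nat.bodd n <;> simp

theorem bitLenCountLoop_eq (n : Nat) : ∀ (length count : Int),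
    bitLenCountLoop n length count
      = (length + (Nat.size n : Int), count + (n.bits.count true : Int)) := by
  induction n using Nat.strong_induction_on with
  | _ n ih =>
    intro length count
    rw [bitLenCountLoop]
    by_cases h : n = 0
    · simp [h]
    · rw [dif_neg h, ih (n / 2) (Nat.div_lt_self (Nat.pos_of_ne_zero h) (by norm_num)),
        size_div_two n h, bits_count_div_two n h]
      refine Prod.ext ?_ ?_ <;> push_cast <;> ring

-- ===== VERDICT (by name: the statement is the Claim_ definition above) =====
theorem bitLenCount_spec : Claim_equal_bitLenCount := by
  intro num _ hpre
  unfold Spec_bitLenCount bitLenCount bitLenCount_alt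
  have habs : num.toNat = num.natAbs := by
    unfold Pre_bitLenCount at hpre; omega
  rw [bitLenCountLoop_eq, habs]
  simp
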